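-- pv_equiv track=rewrite | github.com/ottomattas/llmlog | _refactor/src/llmlog/parsers.py | parse_yes_no
-- ===== SOURCE A (Python) =====
-- from typing import List, Optional
--
-- _PUNCT_TO_SPACE = ["\n", "\r", ",", ".", ":", ";", "!", "?", "(", ")", "[", "]", "{", "}", "'", '"', "`", "*", "_"]
--
-- def _tokenize(text: str) -> List[str]:
--     """Tokenize a model response into lowercase word tokens.
--
--     We intentionally keep this tokenizer very simple and stable so:
--     - prompts can require a single answer token on the last line
--     - runs can include arbitrary reasoning traces above the final answer
--     - parsing remains robust even if the reasoning contains keywords like "contradiction"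
--     """
--     if not text:
--         return []
--     t = text.strip().lower()
--     for ch in _PUNCT_TO_SPACE:
--         t = t.replace(ch, " ")
--     return [p.strip() for p in t.split(" ") if p.strip()]
--
-- def _last_matching_token(tokens: List[str], choices: List[str]) -> Optional[str]:
--     """Return the last token (nearest the end) that matches one of `choices`."""
--     if not tokens:
--         return None
--     choice_set = {c.strip().lower() for c in (choices or []) if str(c).strip()}
--     if not choice_set:
--         return None
--     for tok in reversed(tokens):
--         if tok in choice_set:
--             return tok
--     return None
--
-- def parse_yes_no(text: str, yes_tokens: Optional[List[str]] = None, no_tokens: Optional[List[str]] = None) -> int: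
--     """Return 0 for yes, 1 for no, 2 for unclear.
--
--     Characterization target: experiments/parsers.py
--     """
--     if yes_tokens is None:
--         yes_tokens = ["yes"]
--     if no_tokens is None:
--         no_tokens = ["no"]
--     parts = _tokenize(text)
--
--     # Prefer the last decisive token to support long reasoning traces above
--     # a single final answer token on the last line.
--     tok = _last_matching_token(parts, yes_tokens + no_tokens)
--     if tok is None:
--         return 2
--     if tok in {t.lower() for t in yes_tokens}:
--         return 0
--     if tok in {t.lower() for t in no_tokens}:
--         return 1
--     return 2
-- ===== SOURCE B (Python) =====
-- from typing import List, Optional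
--
-- _PUNCT_TO_SPACE = ["\n", "\r", ",", ".", ":", ";", "!", "?", "(", ")", "[", "]", "{", "}", "'", '"', "`", "*", "_"]
--
-- def _tokenize(text: str) -> List[str]:
--     if not text:
--         return []
--     t = text.strip().lower()
--     for ch in _PUNCT_TO_SPACE:
--         t = t.replace(ch, " ")
--     return [p.strip() for p in t.split(" ") if p.strip()]
--
-- def parse_yes_no(text: str, yes_tokens: Optional[List[str]] = None, no_tokens: Optional[List[str]] = None) -> int:
--     """Return 0 for yes, 1 for no, 2 for unclear.
--
--     Single forward pass: overwrite the result at every decisive token, so the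
--     last decisive token wins without a separate reversed search."""
--     if yes_tokens is None:
--         yes_tokens = ["yes"]
--     if no_tokens is None:
--         no_tokens = ["no"]
--     decisive = {c.strip().lower() for c in yes_tokens + no_tokens if c.strip()}
--     yes_low = {t.lower() for t in yes_tokens}
--     no_low = {t.lower() for t in no_tokens}
--     result = 2
--     for tok in _tokenize(text):
--         if tok in decisive:
--             result = 0 if tok in yes_low else 1 if tok in no_low else 2
--     return result
-- ===== Notes on version B (the rewrite author's own statement) =====
-- stated objective: simpler
-- what changed: Replaces A's reversed early-return search for the last decisive token plus a separate yes/no branch chain by a single forward fold that overwrites a result accumulator at every decisive token, so the last one wins with no reversal and no Optional intermediate.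
import Mathlib
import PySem

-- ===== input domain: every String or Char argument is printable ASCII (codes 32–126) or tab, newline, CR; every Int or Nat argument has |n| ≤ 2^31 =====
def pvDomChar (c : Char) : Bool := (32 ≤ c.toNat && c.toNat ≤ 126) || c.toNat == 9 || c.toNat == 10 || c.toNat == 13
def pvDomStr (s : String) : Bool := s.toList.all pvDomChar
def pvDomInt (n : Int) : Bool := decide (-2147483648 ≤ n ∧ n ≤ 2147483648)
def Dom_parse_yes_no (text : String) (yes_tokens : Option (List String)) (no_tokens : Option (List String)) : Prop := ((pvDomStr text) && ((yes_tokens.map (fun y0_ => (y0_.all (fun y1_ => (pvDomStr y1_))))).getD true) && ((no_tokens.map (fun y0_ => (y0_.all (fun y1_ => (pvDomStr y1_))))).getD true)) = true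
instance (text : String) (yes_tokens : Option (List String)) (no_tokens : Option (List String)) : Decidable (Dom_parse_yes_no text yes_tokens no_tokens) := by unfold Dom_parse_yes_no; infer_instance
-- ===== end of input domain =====

-- B replaces A's reversed early-return search plus branch chain by a single forward
-- fold that overwrites the result at each decisive token (objective: simpler).

-- ===== PORT A =====

-- _PUNCT_TO_SPACE
def pvPunct : List String :=
  ["\n", "\r", ",", ".", ":", ";", "!", "?", "(", ")", "[", "]", "{", "}", "'", "\"", "`", "*", "_"]

-- _tokenize (shared verbatim by A and B: Source B's _tokenize is textually identical)
def pvTokenize (text : String) : List String :=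
  if text = "" then []
  else
    let t := PySem.Str.lower (PySem.Str.strip text)
    let t := pvPunct.foldl (fun t ch => PySem.Str.replace t ch " ") t
    (((PySem.Str.split? t " ").getD []).map PySem.Str.strip).filter (fun p => PySem.Str.strip p ≠ "")

-- _last_matching_token
def pvLastMatching (tokens : List String) (choices : List String) : Option String :=
  if tokens = [] then none
  else
    let choiceSet : PySem.Set String :=
      PySem.Set.ofList ((choices.filter (fun c => PySem.Str.strip c ≠ "")).map
        (fun c => PySem.Str.lower (PySem.Str.strip c)))
    if choiceSet = [] then none
    else tokens.reverse.find? (fun tok => PySem.Set.contains choiceSet tok)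

def parse_yes_no (text : String) (yes_tokens : Option (List String)) (no_tokens : Option (List String)) : Int :=
  let yes := yes_tokens.getD ["yes"]
  let no := no_tokens.getD ["no"]
  let parts := pvTokenize text
  match pvLastMatching parts (yes ++ no) with
  | none => 2
  | some tok =>
    if PySem.Set.contains (PySem.Set.ofList (yes.map PySem.Str.lower)) tok then 0
    else if PySem.Set.contains (PySem.Set.ofList (no.map PySem.Str.lower)) tok then 1
    else 2

-- ===== PORT B =====
def parse_yes_no_alt (text : String) (yes_tokens : Option (List String)) (no_tokens : Option (List String)) : Int :=
  let yes := yes_tokens.getD ["yes"]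
  let no := no_tokens.getD ["no"]
  let decisive : PySem.Set String :=
    PySem.Set.ofList (((yes ++ no).filter (fun c => PySem.Str.strip c ≠ "")).map
      (fun c => PySem.Str.lower (PySem.Str.strip c)))
  let yesLow : PySem.Set String := PySem.Set.ofList (yes.map PySem.Str.lower)
  let noLow : PySem.Set String := PySem.Set.ofList (no.map PySem.Str.lower)
  (pvTokenize text).foldl
    (fun acc tok =>
      if PySem.Set.contains decisive tok then
        (if PySem.Set.contains yesLow tok then 0
         else if PySem.Set.contains noLow tok then 1 else 2)
      else acc) 2

-- ===== PRECONDITION & SPEC =====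
def Spec_parse_yes_no (text : String) (yes_tokens : Option (List String)) (no_tokens : Option (List String)) (out : Int) : Prop := out = parse_yes_no_alt text yes_tokens no_tokens
instance (text : String) (yes_tokens : Option (List String)) (no_tokens : Option (List String)) (out : Int) : Decidable (Spec_parse_yes_no text yes_tokens no_tokens out) := by unfold Spec_parse_yes_no; infer_instance

-- ===== CLAIM (what is proved, stated in full; the proofs are below) =====
def Claim_equal_parse_yes_no : Prop := ∀ (text : String) (yes_tokens : Option (List String)) (no_tokens : Option (List String)), Dom_parse_yes_no text yes_tokens no_tokens → Spec_parse_yes_no text yes_tokens no_tokens (parse_yes_no text yes_tokens no_tokens)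

-- ===== LEMMAS AND PROOFS =====

-- B's overwriting fold computes the classification of the last token found by a reversed search.
theorem pv_foldl_last (g : String → Int) (s : PySem.Set String) (l : List String) (init : Int) :
    l.foldl (fun acc tok => if PySem.Set.contains s tok then g tok else acc) init =
      match l.reverse.find? (fun tok => PySem.Set.contains s tok) with
      | none => init
      | some t => g t := by
  induction l generalizing init with
  | nil => rfl
  | cons x l ih =>
    simp only [List.foldl_cons, List.reverse_cons, List.find?_append, ih]
    cases h : l.reverse.find? (fun tok => PySem.Set.contains s tok) with
    | none => simp only [Option.none_or, List.find?]; split <;> simp_all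
    | some t => simp [Option.or]

theorem parse_yes_no_eq_alt (text : String) (yes_tokens no_tokens : Option (List String)) :
    parse_yes_no text yes_tokens no_tokens = parse_yes_no_alt text yes_tokens no_tokens := by
  unfold parse_yes_no parse_yes_no_alt pvLastMatching
  dsimp only
  rw [pv_foldl_last]
  by_cases hp : pvTokenize text = []
  · rw [if_pos hp, hp]
    rfl
  · rw [if_neg hp]
    by_cases hs :
        PySem.Set.ofList ((((yes_tokens.getD ["yes"]) ++ (no_tokens.getD ["no"])).filter
            (fun c => PySem.Str.strip c ≠ "")).map
            (fun c => PySem.Str.lower (PySem.Str.strip c))) = ([] : PySem.Set String)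
    · rw [if_pos hs]
      have hfind : (pvTokenize text).reverse.find?
          (fun tok => PySem.Set.contains
            (PySem.Set.ofList ((((yes_tokens.getD ["yes"]) ++ (no_tokens.getD ["no"])).filter
              (fun c => PySem.Str.strip c ≠ "")).map
              (fun c => PySem.Str.lower (PySem.Str.strip c)))) tok) = none := by
        rw [List.find?_eq_none]
        intro x _
        rw [hs]
        simp [PySem.Set.contains]
      rw [hfind]
    · rw [if_neg hs]

-- ===== VERDICT (by name: the statement is the Claim_ definition above) =====
theorem parse_yes_no_spec : Claim_equal_parse_yes_no := by
  intro text yt nt _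
  exact parse_yes_no_eq_alt text yt nt
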